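-- pv_equiv track=rewrite | github.com/Sheriffy4/intellirefactor | intellirefactor/analysis/decomposition/block_extractor.py | _calculate_used_imports
-- ===== SOURCE A (Python) =====
-- from typing import Dict, List, Optional, Set, Union, Tuple
--
-- def _calculate_used_imports(file_imports: List[str], raw_calls: List[str]) -> List[str]:
--     """Evidence-based import usage detection based on raw_calls."""
--     used_imports: List[str] = []
--     raw_calls_set = set(raw_calls)
--
--     for imp in file_imports:
--         parts = imp.split(".")
--         head = parts[0]
--         tail = parts[-1]
--
--         is_used = False
--         if tail in raw_calls_set:
--             is_used = True
--         elif any(call.startswith(head + ".") for call in raw_calls_set):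
--             is_used = True
--         elif head in raw_calls_set:
--             is_used = True
--         elif any(call.startswith(tail + ".") or call.endswith("." + tail) for call in raw_calls_set):
--             is_used = True
--
--         if is_used:
--             used_imports.append(imp)
--
--     return used_imports
-- ===== SOURCE B (Python) =====
-- from typing import List
--
--
-- def _head(s: str) -> str:
--     """Segment before the first '.' (the whole string if no dot)."""
--     i = s.find(".")
--     return s if i == -1 else s[:i]
--
--
-- def _tail(s: str) -> str:
--     """Segment after the last '.' (the whole string if no dot)."""
--     i = s.rfind(".")
--     return s[i + 1:]
--
--
-- def _calculate_used_imports(file_imports: List[str], raw_calls: List[str]) -> List[str]: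
--     """Evidence-based import usage detection based on raw_calls.
--
--     One pass over raw_calls builds three lookup tables; then a single pass over
--     file_imports decides each import with O(1) membership tests instead of the
--     inner scans over the call set.
--     """
--     exact = set(raw_calls)
--     dotted = [c for c in raw_calls if "." in c]
--     firsts = {_head(c) for c in dotted}
--     lasts = {_tail(c) for c in dotted}
--
--     used: List[str] = []
--     for imp in file_imports:
--         head = _head(imp)
--         tail = _tail(imp)
--         if (tail in exact or head in firsts or head in exact
--                 or tail in firsts or tail in lasts):
--             used.append(imp)
--     return used
-- ===== Notes on version B (the rewrite author's own statement) =====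
-- stated objective: faster
-- what changed: B builds three lookup tables in one pass over raw_calls (the exact call names, and the first/last dot-segments of calls containing a dot) and then decides each import with O(1) set-membership tests, instead of A's two inner any(...) scans over the whole call set for every import.
import Mathlib
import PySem

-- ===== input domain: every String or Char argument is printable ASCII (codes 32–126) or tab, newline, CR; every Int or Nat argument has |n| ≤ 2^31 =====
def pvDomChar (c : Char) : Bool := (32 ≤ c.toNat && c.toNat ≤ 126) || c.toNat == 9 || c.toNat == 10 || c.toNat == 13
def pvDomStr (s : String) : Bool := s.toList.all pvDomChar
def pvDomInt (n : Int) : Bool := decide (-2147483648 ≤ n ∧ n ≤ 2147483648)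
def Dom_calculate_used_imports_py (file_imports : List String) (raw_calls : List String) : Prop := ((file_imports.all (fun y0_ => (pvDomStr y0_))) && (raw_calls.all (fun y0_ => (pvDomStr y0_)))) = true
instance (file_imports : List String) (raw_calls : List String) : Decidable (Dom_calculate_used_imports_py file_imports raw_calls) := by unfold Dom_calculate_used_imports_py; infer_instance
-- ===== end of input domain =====

-- B replaces A's two inner any(...) scans over the call set by three lookup tables
-- (exact names, first segments and last segments of dotted calls) built in one pass: faster by a constant/asymptotic mechanism.


-- ===== PORT A =====
-- Strings enter the set and the string tests as their character lists (String.toList is injective,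
-- so set membership is unchanged); 'any(... for call in raw_calls_set)' iterates a set, which is
-- order-independent here (any). head+"." is head ++ ['.'], "."+tail is '.' :: tail.
def calculate_used_imports_py (file_imports : List String) (raw_calls : List String) : List String :=
  let raw_calls_set : PySem.Set (List Char) := PySem.Set.ofList (raw_calls.map String.toList)
  file_imports.foldl (fun used_imports imp =>
    let parts := PySem.Chars.splitOn imp.toList ['.']
    let head := parts.headD []      -- parts[0]   (split with a nonempty separator never returns [])
    let tail := parts.getLastD []   -- parts[-1]
    let is_used :=
      if raw_calls_set.contains tail then true
      else if raw_calls_set.any (fun call => PySem.Chars.startswith call (head ++ ['.'])) then true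
      else if raw_calls_set.contains head then true
      else if raw_calls_set.any (fun call =>
        PySem.Chars.startswith call (tail ++ ['.']) || PySem.Chars.endswith call ('.' :: tail)) then true
      else false
    if is_used then used_imports ++ [imp] else used_imports) []

-- ===== PORT B =====
-- _head(s): s[:s.find('.')] (the whole string when find returns -1) = the characters before the
-- first '.', i.e. takeWhile (· != '.')  — exact.
def pvHead (s : List Char) : List Char := s.takeWhile (· != '.')
-- _tail(s): s[s.rfind('.') + 1:] = the characters after the last '.' (all of s when there is
-- none), i.e. the reversed takeWhile of the reversal — exact.
def pvTail (s : List Char) : List Char := (s.reverse.takeWhile (· != '.')).reverse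

def calculate_used_imports_py_alt (file_imports : List String) (raw_calls : List String) : List String :=
  let calls := raw_calls.map String.toList
  let exact : PySem.Set (List Char) := PySem.Set.ofList calls
  let dotted := calls.filter (fun c => PySem.Chars.isIn ['.'] c)   -- '.' in c
  let firsts : PySem.Set (List Char) := PySem.Set.ofList (dotted.map pvHead)
  let lasts : PySem.Set (List Char) := PySem.Set.ofList (dotted.map pvTail)
  file_imports.foldl (fun used imp =>
    let head := pvHead imp.toList
    let tail := pvTail imp.toList
    if exact.contains tail || firsts.contains head || exact.contains head
        || firsts.contains tail || lasts.contains tail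
    then used ++ [imp] else used) []

-- ===== PRECONDITION & SPEC =====
def Spec_calculate_used_imports_py (file_imports : List String) (raw_calls : List String) (out : List String) : Prop := out = calculate_used_imports_py_alt file_imports raw_calls
instance (file_imports : List String) (raw_calls : List String) (out : List String) : Decidable (Spec_calculate_used_imports_py file_imports raw_calls out) := by unfold Spec_calculate_used_imports_py; infer_instance

-- ===== CLAIM (what is proved, stated in full; the proofs are below) =====
def Claim_equal_calculate_used_imports_py : Prop := ∀ (file_imports : List String) (raw_calls : List String), Dom_calculate_used_imports_py file_imports raw_calls → Spec_calculate_used_imports_py file_imports raw_calls (calculate_used_imports_py file_imports raw_calls)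

-- ===== LEMMAS AND PROOFS =====

-- A clean structural model of imp.split(".") (single-character separator).
def pvMapHead (f : List Char → List Char) : List (List Char) → List (List Char)
  | [] => []
  | x :: xs => f x :: xs

def pvSplit1 : List Char → List (List Char)
  | [] => [[]]
  | c :: rest => if c = '.' then [] :: pvSplit1 rest else pvMapHead (c :: ·) (pvSplit1 rest)

theorem pvSplit1_ne_nil (cs : List Char) : pvSplit1 cs ≠ [] := by
  induction cs with
  | nil => simp [pvSplit1]
  | cons c rest ih =>
    simp only [pvSplit1]
    split
    · simp
    · cases h : pvSplit1 rest with
      | nil => exact absurd h ih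
      | cons x xs => simp [pvMapHead]

theorem pvMapHead_id (X : List (List Char)) : pvMapHead (fun x => [] ++ x) X = X := by
  cases X <;> simp [pvMapHead]

theorem pv_go_eq (fuel : Nat) : ∀ (l cur : List Char) (acc : List (List Char)),
    l.length ≤ fuel →
    PySem.Chars.splitOn.go ['.'] fuel l cur acc
      = acc.reverse ++ pvMapHead (fun x => cur.reverse ++ x) (pvSplit1 l) := by
  induction fuel with
  | zero =>
    intro l cur acc hl
    have : l = [] := List.length_eq_zero_iff.mp (Nat.le_zero.mp hl)
    subst this
    rw [PySem.Chars.splitOn.go.eq_def]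
    simp [pvSplit1, pvMapHead]
  | succ f ih =>
    intro l cur acc hl
    cases l with
    | nil =>
      rw [PySem.Chars.splitOn.go.eq_def]
      simp [pvSplit1, pvMapHead]
    | cons c rest =>
      rw [PySem.Chars.splitOn.go.eq_def]
      dsimp only []
      simp only [List.length_cons] at hl
      by_cases hc : c = '.'
      · subst hc
        rw [if_pos (by simp [List.isPrefixOf])]
        simp only [List.length_cons, List.length_nil, List.drop_succ_cons, List.drop_zero]
        rw [ih rest [] (cur.reverse :: acc) (by omega)]
        rw [show (fun x => ([] : List Char).reverse ++ x) = (fun x => ([] : List Char) ++ x) by funext x; simp]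
        rw [pvMapHead_id]
        simp [pvSplit1, pvMapHead]
      · rw [if_neg (by simp [List.isPrefixOf, Ne.symm hc])]
        rw [ih rest (c :: cur) acc (by omega)]
        simp only [pvSplit1, if_neg hc]
        cases h : pvSplit1 rest with
        | nil => exact absurd h (pvSplit1_ne_nil rest)
        | cons x xs => simp [pvMapHead]

theorem pv_splitOn_eq (cs : List Char) : PySem.Chars.splitOn cs ['.'] = pvSplit1 cs := by
  show PySem.Chars.splitOn.go ['.'] (cs.length + 1) cs [] [] = _
  rw [pv_go_eq (cs.length + 1) cs [] [] (by omega)]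
  cases h : pvSplit1 cs with
  | nil => exact absurd h (pvSplit1_ne_nil cs)
  | cons x xs => simp [pvMapHead]

theorem pvSplit1_headD (cs : List Char) : (pvSplit1 cs).headD [] = pvHead cs := by
  induction cs with
  | nil => simp [pvSplit1, pvHead]
  | cons c rest ih =>
    simp only [pvSplit1, pvHead]
    by_cases hc : c = '.'
    · subst hc; simp
    · rw [if_neg hc]
      cases h : pvSplit1 rest with
      | nil => exact absurd h (pvSplit1_ne_nil rest)
      | cons x xs =>
        simp only [pvMapHead, List.headD_cons, List.takeWhile_cons, bne_iff_ne, ne_eq, hc,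
          not_false_eq_true, if_pos]
        rw [h] at ih
        simp only [List.headD_cons] at ih
        simp [pvHead] at ih
        simp [ih]

-- takeWhile is unchanged by elements appended after a failing one / extended over passing ones:
theorem pv_takeWhile_append_of_stop {p : Char → Bool} {xs : List Char} (ys : List Char)
    (h : ∃ e ∈ xs, p e = false) : (xs ++ ys).takeWhile p = xs.takeWhile p := by
  induction xs with
  | nil => rcases h with ⟨e, he, _⟩; cases he
  | cons x xt ih =>
    by_cases hx : p x
    · rcases h with ⟨e, he, hpe⟩
      rcases List.mem_cons.mp he with rfl | he'
      · rw [hx] at hpe; cases hpe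
      · simp [hx, ih ⟨e, he', hpe⟩]
    · simp [Bool.eq_false_iff.mpr hx]

theorem pv_takeWhile_last_false {p : Char → Bool} {a : Char} (ha : p a = false)
    (xs : List Char) : (xs ++ [a]).takeWhile p = xs.takeWhile p := by
  induction xs with
  | nil => simp [ha]
  | cons x xt ih =>
    by_cases hx : p x
    · simp [hx, ih]
    · simp [Bool.eq_false_iff.mpr hx]

theorem pv_dropWhile_cons_false {p : Char → Bool} {l : List Char} {x : Char} {xt : List Char}
    (h : l.dropWhile p = x :: xt) : p x = false := by
  induction l with
  | nil => cases h
  | cons a al ih =>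
    by_cases ha : p a
    · rw [List.dropWhile_cons_of_pos ha] at h; exact ih h
    · rw [List.dropWhile_cons_of_neg ha] at h
      cases h; exact Bool.eq_false_iff.mpr ha

theorem pvSplit1_of_no_dot {cs : List Char} (h : '.' ∉ cs) : pvSplit1 cs = [cs] := by
  induction cs with
  | nil => simp [pvSplit1]
  | cons c rest ih =>
    simp only [List.mem_cons, not_or] at h
    simp [pvSplit1, Ne.symm h.1, ih h.2, pvMapHead]

theorem pvSplit1_two_le {cs : List Char} (h : '.' ∈ cs) : 2 ≤ (pvSplit1 cs).length := by
  induction cs with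
  | nil => cases h
  | cons c rest ih =>
    simp only [pvSplit1]
    by_cases hc : c = '.'
    · subst hc
      have := List.length_pos_iff.mpr (pvSplit1_ne_nil rest)
      simp; omega
    · rw [if_neg hc]
      rcases List.mem_cons.mp h with h1 | h2
      · exact absurd h1.symm hc
      · cases hs : pvSplit1 rest with
        | nil => exact absurd hs (pvSplit1_ne_nil rest)
        | cons x xs => have := ih h2; rw [hs] at this; simpa [pvMapHead] using this

theorem pvTail_cons_dot (rest : List Char) : pvTail ('.' :: rest) = pvTail rest := by
  simp only [pvTail, List.reverse_cons]
  rw [pv_takeWhile_last_false (by simp)]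

theorem pvSplit1_getLastD (cs : List Char) : (pvSplit1 cs).getLastD [] = pvTail cs := by
  induction cs with
  | nil => simp [pvSplit1, pvTail]
  | cons c rest ih =>
    by_cases hc : c = '.'
    · subst hc
      simp only [pvSplit1]
      rw [pvTail_cons_dot]
      cases h : pvSplit1 rest with
      | nil => exact absurd h (pvSplit1_ne_nil rest)
      | cons x xs => rw [h] at ih; simpa using ih
    · simp only [pvSplit1, if_neg hc]
      by_cases hd : '.' ∈ rest
      · have h2 := pvSplit1_two_le hd
        cases hs : pvSplit1 rest with
        | nil => exact absurd hs (pvSplit1_ne_nil rest)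
        | cons x xs =>
          cases xs with
          | nil => rw [hs] at h2; simp at h2
          | cons y ys =>
            rw [hs] at ih
            simp only [pvMapHead]
            rw [show pvTail (c :: rest) = pvTail rest from ?_]
            · simpa using ih
            · simp only [pvTail, List.reverse_cons]
              rw [pv_takeWhile_append_of_stop]
              exact ⟨'.', List.mem_reverse.mpr hd, by simp⟩
      · rw [pvSplit1_of_no_dot hd]
        simp only [pvMapHead, List.getLastD]
        simp only [pvTail, List.reverse_cons]
        rw [List.takeWhile_append_of_pos, List.takeWhile_cons]
        · simp [hc]
        · intro e he
          simp only [bne_iff_ne, ne_eq]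
          intro heq
          exact hd (heq ▸ List.mem_reverse.mp he)

-- no segment contains a dot
theorem pvHead_no_dot (cs : List Char) : '.' ∉ pvHead cs := by
  intro h
  have := List.mem_takeWhile_imp h
  simp at this

theorem pvTail_no_dot (cs : List Char) : '.' ∉ pvTail cs := by
  intro h
  rw [pvTail, List.mem_reverse] at h
  have := List.mem_takeWhile_imp h
  simp at this

-- the characterisation of startswith(h + ".") / endswith("." + t)
theorem pv_prefix_iff {h c : List Char} (hh : '.' ∉ h) :
    h ++ ['.'] <+: c ↔ ('.' ∈ c ∧ pvHead c = h) := by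
  constructor
  · rintro ⟨r, rfl⟩
    constructor
    · simp
    · simp only [pvHead, List.append_assoc]
      rw [List.takeWhile_append_of_pos]
      · simp
      · intro e he
        simp only [bne_iff_ne, ne_eq]
        intro heq; exact hh (heq ▸ he)
  · rintro ⟨hdot, rfl⟩
    have hsplit := List.takeWhile_append_dropWhile (p := (· != '.')) (l := c)
    have hdrop : c.dropWhile (· != '.') ≠ [] := by
      intro hnil
      rw [hnil, List.append_nil] at hsplit
      exact pvHead_no_dot c (by unfold pvHead; rw [hsplit]; exact hdot)
    cases hd : c.dropWhile (· != '.') with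
    | nil => exact absurd hd hdrop
    | cons x xt =>
      have hx : (x != '.') = false := pv_dropWhile_cons_false (p := (· != '.')) hd
      have hx' : x = '.' := by simpa using hx
      refine ⟨xt, ?_⟩
      calc pvHead c ++ ['.'] ++ xt = c.takeWhile (· != '.') ++ (x :: xt) := by
            simp [pvHead, hx']
        _ = c := by rw [← hd]; exact hsplit

theorem pv_suffix_iff {t c : List Char} (ht : '.' ∉ t) :
    '.' :: t <:+ c ↔ ('.' ∈ c ∧ pvTail c = t) := by
  rw [← List.reverse_prefix]
  simp only [List.reverse_cons]
  rw [pv_prefix_iff (by simpa using ht)]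
  constructor
  · rintro ⟨h1, h2⟩
    refine ⟨by simpa using h1, ?_⟩
    simp only [pvTail, pvHead] at *
    rw [h2]; simp
  · rintro ⟨h1, h2⟩
    refine ⟨by simpa using h1, ?_⟩
    simp only [pvTail] at h2
    simp only [pvHead]
    rw [← h2]; simp

-- membership in the B-side tables
theorem pv_firsts_iff (calls : List (List Char)) (h : List Char) (hh : '.' ∉ h) :
    (((calls.filter (fun c => PySem.Chars.isIn ['.'] c)).map pvHead).contains h = true)
      ↔ ∃ c ∈ calls, PySem.Chars.startswith c (h ++ ['.']) = true := by
  rw [List.contains_iff_mem]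
  simp only [List.mem_map, List.mem_filter]
  constructor
  · rintro ⟨c, ⟨hc, hdot⟩, rfl⟩
    refine ⟨c, hc, ?_⟩
    rw [PySem.Chars.startswith_iff, pv_prefix_iff hh]
    have : '.' ∈ c := by
      have := (PySem.Chars.isIn_iff_infix ['.'] c).mp hdot
      rcases this with ⟨s, t, rfl⟩; simp
    exact ⟨this, rfl⟩
  · rintro ⟨c, hc, hsw⟩
    rw [PySem.Chars.startswith_iff, pv_prefix_iff hh] at hsw
    refine ⟨c, ⟨hc, ?_⟩, hsw.2⟩
    rw [PySem.Chars.isIn_iff_infix]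
    rcases List.mem_iff_append.mp hsw.1 with ⟨s, t, rfl⟩
    exact ⟨s, t, by simp⟩

theorem pv_lasts_iff (calls : List (List Char)) (t : List Char) (ht : '.' ∉ t) :
    (((calls.filter (fun c => PySem.Chars.isIn ['.'] c)).map pvTail).contains t = true)
      ↔ ∃ c ∈ calls, PySem.Chars.endswith c ('.' :: t) = true := by
  rw [List.contains_iff_mem]
  simp only [List.mem_map, List.mem_filter]
  constructor
  · rintro ⟨c, ⟨hc, hdot⟩, rfl⟩
    refine ⟨c, hc, ?_⟩
    rw [PySem.Chars.endswith_iff, pv_suffix_iff ht]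
    have : '.' ∈ c := by
      have := (PySem.Chars.isIn_iff_infix ['.'] c).mp hdot
      rcases this with ⟨s, t', rfl⟩; simp
    exact ⟨this, rfl⟩
  · rintro ⟨c, hc, hsw⟩
    rw [PySem.Chars.endswith_iff, pv_suffix_iff ht] at hsw
    refine ⟨c, ⟨hc, ?_⟩, hsw.2⟩
    rw [PySem.Chars.isIn_iff_infix]
    rcases List.mem_iff_append.mp hsw.1 with ⟨s, t', rfl⟩
    exact ⟨s, t', by simp⟩

theorem pv_any_or (l : List (List Char)) (p q : List Char → Bool) :
    (l.any fun x => p x || q x) = (l.any p || l.any q) := by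
  induction l with
  | nil => rfl
  | cons a t ih =>
    simp only [List.any_cons, ih]
    cases p a
    · simp [Bool.or_left_comm]
    · simp

theorem pv_set_any (l : List (List Char)) (p : List Char → Bool) :
    (PySem.Set.ofList l).any p = l.any p := by
  cases hA : (PySem.Set.ofList l).any p
  · cases hB : l.any p
    · rfl
    · exfalso
      rcases List.any_eq_true.mp hB with ⟨x, hx, hpx⟩
      have : x ∈ PySem.Set.ofList l := (PySem.Set.mem_ofList l x).mpr hx
      have := List.any_eq_true.mpr ⟨x, this, hpx⟩
      rw [hA] at this; cases this
  · rcases List.any_eq_true.mp hA with ⟨x, hx, hpx⟩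
    have : x ∈ l := (PySem.Set.mem_ofList l x).mp hx
    exact (List.any_eq_true.mpr ⟨x, this, hpx⟩).symm

theorem pv_set_contains (l : List (List Char)) (x : List Char) :
    List.contains (PySem.Set.ofList l) x = l.contains x := by
  rw [Bool.eq_iff_iff]
  simp only [List.contains_iff_mem]
  exact PySem.Set.mem_ofList l x

-- the per-import decision of A equals that of B
theorem pv_cond_eq (raw_calls : List String) (imp : String) :
    (let parts := PySem.Chars.splitOn imp.toList ['.']
     let head := parts.headD []
     let tail := parts.getLastD []
     let s := PySem.Set.ofList (raw_calls.map String.toList)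
     let is_used :=
       if s.contains tail then true
       else if s.any (fun call => PySem.Chars.startswith call (head ++ ['.'])) then true
       else if s.contains head then true
       else if s.any (fun call =>
         PySem.Chars.startswith call (tail ++ ['.']) || PySem.Chars.endswith call ('.' :: tail)) then true
       else false
     is_used)
    = (let calls := raw_calls.map String.toList
       let exact := PySem.Set.ofList calls
       let dotted := calls.filter (fun c => PySem.Chars.isIn ['.'] c)
       let firsts := PySem.Set.ofList (dotted.map pvHead)
       let lasts := PySem.Set.ofList (dotted.map pvTail)
       (exact.contains (pvTail imp.toList) || firsts.contains (pvHead imp.toList)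
         || exact.contains (pvHead imp.toList) || firsts.contains (pvTail imp.toList)
         || lasts.contains (pvTail imp.toList))) := by
  have hhead : (PySem.Chars.splitOn imp.toList ['.']).headD [] = pvHead imp.toList := by
    rw [pv_splitOn_eq]; exact pvSplit1_headD _
  have htail : (PySem.Chars.splitOn imp.toList ['.']).getLastD [] = pvTail imp.toList := by
    rw [pv_splitOn_eq]; exact pvSplit1_getLastD _
  simp only [hhead, htail]
  set calls := raw_calls.map String.toList with hcalls
  set H := pvHead imp.toList
  set T := pvTail imp.toList
  -- condition 2 of A = head ∈ firsts of B
  have h2 : (PySem.Set.ofList calls).any (fun call => PySem.Chars.startswith call (H ++ ['.']))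
      = ((calls.filter (fun c => PySem.Chars.isIn ['.'] c)).map pvHead).contains H := by
    rw [pv_set_any]
    cases hB : ((calls.filter (fun c => PySem.Chars.isIn ['.'] c)).map pvHead).contains H
    · rw [List.any_eq_false]
      intro c hc hsw
      have := (pv_firsts_iff calls H (pvHead_no_dot _)).mpr ⟨c, hc, hsw⟩
      rw [hB] at this; cases this
    · rcases (pv_firsts_iff calls H (pvHead_no_dot _)).mp hB with ⟨c, hc, hsw⟩
      exact List.any_eq_true.mpr ⟨c, hc, hsw⟩
  have h4f : (PySem.Set.ofList calls).any (fun call => PySem.Chars.startswith call (T ++ ['.']))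
      = ((calls.filter (fun c => PySem.Chars.isIn ['.'] c)).map pvHead).contains T := by
    rw [pv_set_any]
    cases hB : ((calls.filter (fun c => PySem.Chars.isIn ['.'] c)).map pvHead).contains T
    · rw [List.any_eq_false]
      intro c hc hsw
      have := (pv_firsts_iff calls T (pvTail_no_dot _)).mpr ⟨c, hc, hsw⟩
      rw [hB] at this; cases this
    · rcases (pv_firsts_iff calls T (pvTail_no_dot _)).mp hB with ⟨c, hc, hsw⟩
      exact List.any_eq_true.mpr ⟨c, hc, hsw⟩
  have h4l : (PySem.Set.ofList calls).any (fun call => PySem.Chars.endswith call ('.' :: T))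
      = ((calls.filter (fun c => PySem.Chars.isIn ['.'] c)).map pvTail).contains T := by
    rw [pv_set_any]
    cases hB : ((calls.filter (fun c => PySem.Chars.isIn ['.'] c)).map pvTail).contains T
    · rw [List.any_eq_false]
      intro c hc hsw
      have := (pv_lasts_iff calls T (pvTail_no_dot _)).mpr ⟨c, hc, hsw⟩
      rw [hB] at this; cases this
    · rcases (pv_lasts_iff calls T (pvTail_no_dot _)).mp hB with ⟨c, hc, hsw⟩
      exact List.any_eq_true.mpr ⟨c, hc, hsw⟩
  have hany_or : List.any (PySem.Set.ofList calls) (fun call =>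
        PySem.Chars.startswith call (T ++ ['.']) || PySem.Chars.endswith call ('.' :: T))
      = (List.any (PySem.Set.ofList calls) (fun call => PySem.Chars.startswith call (T ++ ['.']))
        || List.any (PySem.Set.ofList calls) (fun call => PySem.Chars.endswith call ('.' :: T))) :=
    pv_any_or _ _ _
  simp only [PySem.Set.contains]
  rw [hany_or, h2, h4f, h4l]
  simp only [pv_set_contains]
  cases calls.contains T <;> cases calls.contains H <;>
    cases ((calls.filter (fun c => PySem.Chars.isIn ['.'] c)).map pvHead).contains H <;>
    cases ((calls.filter (fun c => PySem.Chars.isIn ['.'] c)).map pvHead).contains T <;>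
    cases ((calls.filter (fun c => PySem.Chars.isIn ['.'] c)).map pvTail).contains T <;> rfl

-- ===== VERDICT (by name: the statement is the Claim_ definition above) =====
theorem calculate_used_imports_py_spec : Claim_equal_calculate_used_imports_py := by
  intro file_imports raw_calls _
  unfold Spec_calculate_used_imports_py
  unfold calculate_used_imports_py calculate_used_imports_py_alt
  simp only []
  rw [PySem.List.foldl_append_if_eq_filter, PySem.List.foldl_append_if_eq_filter]
  simp only [List.nil_append]
  exact List.filter_congr (fun imp _ => pv_cond_eq raw_calls imp)
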